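-- pv_equiv track=rewrite | github.com/Ja34ek/Algorytmy-zaawansowane | Studnie.py | update_R_S
-- ===== SOURCE A (Python) =====
-- def delete(L,x):
--     """
--     Funkcja pomocnicza
--     """
--     for i in range(len(L)):
--         if L[i]==x:
--             return L[:i]+L[i+1:]
--     return L
--
-- def update_R_S(R_S,M):
--     """
--     Uaktualnienie zbioru R_S
--     """
--     RS=R_S.copy()
--     for pary in M:
--         if pary[0] in RS:
--             RS=delete(RS,pary[0])
--     if RS==None:
--         return []
--     return RS
-- ===== SOURCE B (Python) =====
-- def update_R_S(R_S, M):
--     firsts = [p[0] for p in M]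
--     cnt = {}
--     for x in firsts:
--         cnt[x] = cnt.get(x, 0) + 1
--     out = []
--     for x in R_S:
--         c = cnt.get(x, 0)
--         if c != 0:
--             cnt[x] = c - 1
--         else:
--             out.append(x)
--     return out
-- ===== Notes on version B (the rewrite author's own statement) =====
-- stated objective: faster
-- what changed: Replaces the per-pair membership test plus first-occurrence deletion (a scan of R_S for every pair in M) with a counter of M's first elements built once and a single filtering pass over R_S that decrements counts.
import Mathlib
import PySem

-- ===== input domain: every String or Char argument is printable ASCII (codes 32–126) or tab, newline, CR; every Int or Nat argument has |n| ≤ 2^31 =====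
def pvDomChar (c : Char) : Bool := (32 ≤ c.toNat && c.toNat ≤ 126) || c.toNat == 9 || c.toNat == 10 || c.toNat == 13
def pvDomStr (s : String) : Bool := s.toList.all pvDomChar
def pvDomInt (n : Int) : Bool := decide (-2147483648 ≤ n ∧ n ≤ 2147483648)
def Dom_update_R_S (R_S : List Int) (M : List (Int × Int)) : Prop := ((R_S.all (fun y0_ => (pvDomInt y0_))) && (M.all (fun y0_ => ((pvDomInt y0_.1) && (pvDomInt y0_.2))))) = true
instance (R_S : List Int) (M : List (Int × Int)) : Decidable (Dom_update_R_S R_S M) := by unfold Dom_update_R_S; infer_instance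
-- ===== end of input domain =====

-- B replaces A's per-pair membership test + first-occurrence deletion (a scan of R_S
-- per pair of M) by a counter of M's first elements and one filtering pass over R_S (faster).

-- ===== PORT A =====
-- helper 'delete': first index i with L[i] == x gives L[:i] + L[i+1:]; else L unchanged
def pyDelete : List Int → Int → List Int
  | [], _ => []
  | h :: t, x => if h = x then t else h :: pyDelete t x

-- the final 'if RS == None: return []' can never fire (RS is always a list); it is dead code
def update_R_S (R_S : List Int) (M : List (Int × Int)) : List Int :=
  M.foldl (fun rs pary => if pary.1 ∈ rs then pyDelete rs pary.1 else rs) R_S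

-- ===== PORT B =====
def update_R_S_alt (R_S : List Int) (M : List (Int × Int)) : List Int :=
  let firsts := M.map (fun p => p.1)
  let cnt := firsts.foldl (fun d x => d.insert x (d.getD x 0 + 1)) (PySem.Dict.empty)
  let res := R_S.foldl
    (fun (s : PySem.Dict Int Int × List Int) x =>
      let c := s.1.getD x 0
      if c ≠ 0 then (s.1.insert x (c - 1), s.2)
      else (s.1, s.2 ++ [x]))
    (cnt, [])
  res.2

-- ===== PRECONDITION & SPEC =====
def Spec_update_R_S (R_S : List Int) (M : List (Int × Int)) (out : List Int) : Prop := out = update_R_S_alt R_S M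
instance (R_S : List Int) (M : List (Int × Int)) (out : List Int) : Decidable (Spec_update_R_S R_S M out) := by unfold Spec_update_R_S; infer_instance

-- ===== CLAIM (what is proved, stated in full; the proofs are below) =====
def Claim_equal_update_R_S : Prop := ∀ (R_S : List Int) (M : List (Int × Int)), Dom_update_R_S R_S M → Spec_update_R_S R_S M (update_R_S R_S M)

-- ===== LEMMAS AND PROOFS =====

-- reference: remove, left to right, every element whose current count is non-zero, decrementing
def rem (c : Int → Int) : List Int → List Int
  | [] => []
  | x :: t => if c x ≠ 0 then rem (fun y => if y = x then c x - 1 else c y) t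
              else x :: rem c t

theorem pyDelete_of_not_mem (L : List Int) (x : Int) (h : x ∉ L) : pyDelete L x = L := by
  induction L with
  | nil => rfl
  | cons a t ih =>
    simp only [List.mem_cons, not_or] at h
    simp [pyDelete, Ne.symm h.1, ih h.2]

theorem pyDelete_cons_self (x : Int) (t : List Int) : pyDelete (x :: t) x = t := by
  simp [pyDelete]

theorem pyDelete_cons_ne (x a : Int) (t : List Int) (h : x ≠ a) :
    pyDelete (x :: t) a = x :: pyDelete t a := by
  simp [pyDelete, h]

theorem rem_cons_pos (c : Int → Int) (x : Int) (t : List Int) (h : c x ≠ 0) :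
    rem c (x :: t) = rem (fun y => if y = x then c x - 1 else c y) t := by
  simp [rem, h]

theorem rem_cons_neg (c : Int → Int) (x : Int) (t : List Int) (h : c x = 0) :
    rem c (x :: t) = x :: rem c t := by
  simp [rem, h]

theorem rem_zero (L : List Int) : rem (fun _ => 0) L = L := by
  induction L with
  | nil => rfl
  | cons a t ih => simp [rem, ih]

theorem rem_congr (c c' : Int → Int) (h : ∀ y, c y = c' y) (L : List Int) :
    rem c L = rem c' L := by
  have : c = c' := funext h
  rw [this]

-- key lemma: adding one to the count at a = deleting the first occurrence of a
theorem rem_add_one (L : List Int) : ∀ (c : Int → Int) (a : Int), (∀ y, 0 ≤ c y) →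
    rem (fun y => if y = a then c y + 1 else c y) L = rem c (pyDelete L a) := by
  induction L with
  | nil => intro c a _; rfl
  | cons x t ih =>
    intro c a hnn
    by_cases hxa : x = a
    · subst hxa
      rw [pyDelete_cons_self]
      rw [rem_cons_pos _ x t (by simp; have := hnn x; omega)]
      refine rem_congr _ _ (fun y => ?_) t
      by_cases h : y = x
      · subst h; simp
      · simp [h]
    · rw [pyDelete_cons_ne _ _ _ hxa]
      by_cases hcx : c x = 0
      · rw [rem_cons_neg _ x t (by simp [hxa, hcx]), rem_cons_neg c x _ hcx, ih c a hnn]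
      · rw [rem_cons_pos _ x t (by simp [hxa, hcx]), rem_cons_pos c x _ hcx]
        rw [← ih (fun y => if y = x then c x - 1 else c y) a
              (by intro y
                  by_cases h : y = x
                  · subst h; simp; have := hnn y; omega
                  · simp [h]; exact hnn y)]
        refine rem_congr _ _ (fun y => ?_) t
        by_cases hyx : y = x
        · subst hyx; simp [hxa]
        · by_cases hya : y = a <;> simp [hyx, hya, Ne.symm hxa]

-- A equals the reference removal driven by the counts of M's first elements
theorem updateA_eq_rem (M : List (Int × Int)) : ∀ (R_S : List Int),
    update_R_S R_S M = rem (fun y => ((M.map (fun p => p.1)).count y : Int)) R_S := by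
  induction M with
  | nil =>
    intro R_S
    simp only [update_R_S, List.foldl_nil, List.map_nil]
    rw [rem_congr _ (fun _ => 0) (fun y => by simp) R_S, rem_zero]
  | cons p M' ih =>
    intro R_S
    have hstep : (if p.1 ∈ R_S then pyDelete R_S p.1 else R_S) = pyDelete R_S p.1 := by
      by_cases h : p.1 ∈ R_S
      · simp [h]
      · simp [h, pyDelete_of_not_mem _ _ h]
    have hA : update_R_S R_S (p :: M') = update_R_S (pyDelete R_S p.1) M' := by
      simp only [update_R_S, List.foldl_cons, hstep]
    rw [hA, ih (pyDelete R_S p.1),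
        ← rem_add_one R_S (fun y => ((M'.map (fun p => p.1)).count y : Int)) p.1
          (fun y => by positivity)]
    refine rem_congr _ _ (fun y => ?_) R_S
    by_cases h : y = p.1
    · subst h
      simp
    · simp [h, Ne.symm h]

-- B's filtering fold equals the reference removal
theorem updateB_loop (L : List Int) : ∀ (d : PySem.Dict Int Int) (acc : List Int),
    (L.foldl
      (fun (s : PySem.Dict Int Int × List Int) x =>
        let c := s.1.getD x 0
        if c ≠ 0 then (s.1.insert x (c - 1), s.2)
        else (s.1, s.2 ++ [x]))
      (d, acc)).2 = acc ++ rem (fun y => d.getD y 0) L := by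
  induction L with
  | nil => intro d acc; simp [rem]
  | cons x t ih =>
    intro d acc
    by_cases h : d.getD x 0 ≠ 0
    · simp only [List.foldl_cons, rem, if_pos h]
      rw [ih]
      refine congrArg _ (rem_congr _ _ (fun y => ?_) t)
      rw [PySem.Dict.getD_insert]
    · simp only [List.foldl_cons, rem, if_neg h]
      rw [ih, List.append_assoc]
      rfl

-- ===== VERDICT (by name: the statement is the Claim_ definition above) =====
theorem update_R_S_spec : Claim_equal_update_R_S := by
  intro R_S M _
  unfold Spec_update_R_S update_R_S_alt
  rw [updateB_loop, PySem.Dict.foldl_insert_getD_add_one_eq_counter]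
  rw [List.nil_append, updateA_eq_rem]
  refine rem_congr _ _ (fun y => ?_) R_S
  rw [PySem.Dict.getD_counter]
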